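-- pv_equiv track=rewrite | github.com/Ferrari25/ParserASDPpy | Automatas.py | automata_equal
-- ===== SOURCE A (Python) =====
-- ESTADO_FINAL = "ESTADO FINAL"
--
-- ESTADO_NO_FINAL = "NO ACEPTADO"
--
-- ESTADO_TRAMPA = "EN ESTADO TRAMPA"
--
-- def automata_equal(lexema):
--     estadoactual = 0
--     estadosfinales = [5]
--     for vcarac in lexema:
--         if estadoactual == 0 and vcarac == 'e':
--            estadoactual = 1
--         elif estadoactual == 1 and vcarac == 'q':
--            estadoactual = 2
--         elif estadoactual == 2 and vcarac == 'u':
--            estadoactual = 3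
--         elif estadoactual == 3 and vcarac == 'a':
--            estadoactual = 4
--         elif estadoactual == 4 and vcarac == 'l':
--            estadoactual = 5
--         else:
--            estadoactual = -1
--            break
--     if estadoactual == -1:
--        return ESTADO_TRAMPA
--     if estadoactual in estadosfinales:
--         return ESTADO_FINAL
--     else:
--         return ESTADO_NO_FINAL
-- ===== SOURCE B (Python) =====
-- ESTADO_FINAL = "ESTADO FINAL"
-- ESTADO_NO_FINAL = "NO ACEPTADO"
-- ESTADO_TRAMPA = "EN ESTADO TRAMPA"
--
-- def automata_equal(lexema):
--     target = "equal"
--     seq = list(lexema)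
--     t = list(target)
--     if seq == t:
--         return ESTADO_FINAL
--     if len(seq) < len(t) and seq == t[:len(seq)]:
--         return ESTADO_NO_FINAL
--     return ESTADO_TRAMPA
-- ===== Notes on version B (the rewrite author's own statement) =====
-- stated objective: simpler
-- what changed: Replaced the per-character 6-state DFA loop with direct whole-input comparisons against the target string: equality for acceptance, proper-prefix comparison for the non-final case, trap otherwise.
import Mathlib
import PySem

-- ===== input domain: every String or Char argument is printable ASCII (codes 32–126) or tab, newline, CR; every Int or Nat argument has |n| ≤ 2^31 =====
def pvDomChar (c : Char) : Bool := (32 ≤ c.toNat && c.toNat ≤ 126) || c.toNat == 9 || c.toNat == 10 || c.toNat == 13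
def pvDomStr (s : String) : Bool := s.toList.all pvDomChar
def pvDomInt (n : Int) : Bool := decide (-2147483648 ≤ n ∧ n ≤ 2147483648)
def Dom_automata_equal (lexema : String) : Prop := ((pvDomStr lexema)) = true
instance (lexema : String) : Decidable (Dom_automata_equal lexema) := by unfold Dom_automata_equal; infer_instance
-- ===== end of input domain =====

-- B replaces A's per-character 6-state DFA loop with direct whole-input
-- comparisons against the literal "equal" (objective: simpler).

-- ===== PORT A =====
-- the for-loop of A, with 'break' modelled by returning -1 immediately
def automata_equal_loop (estadoactual : Int) : List Char → Int
  | [] => estadoactual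
  | vcarac :: rest =>
    if estadoactual = 0 ∧ vcarac = 'e' then automata_equal_loop 1 rest
    else if estadoactual = 1 ∧ vcarac = 'q' then automata_equal_loop 2 rest
    else if estadoactual = 2 ∧ vcarac = 'u' then automata_equal_loop 3 rest
    else if estadoactual = 3 ∧ vcarac = 'a' then automata_equal_loop 4 rest
    else if estadoactual = 4 ∧ vcarac = 'l' then automata_equal_loop 5 rest
    else -1

def automata_equal (lexema : String) : String :=
  let estadoactual := automata_equal_loop 0 lexema.toList
  let estadosfinales : List Int := [5]
  if estadoactual = -1 then "EN ESTADO TRAMPA"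
  else if estadoactual ∈ estadosfinales then "ESTADO FINAL"
  else "NO ACEPTADO"

-- ===== PORT B =====
def automata_equal_alt (lexema : String) : String :=
  let t := "equal".toList
  let seq := lexema.toList
  if seq = t then "ESTADO FINAL"
  else if seq.length < t.length ∧ seq = t.take seq.length then "NO ACEPTADO"
  else "EN ESTADO TRAMPA"

-- ===== PRECONDITION & SPEC =====
def Spec_automata_equal (lexema : String) (out : String) : Prop := out = automata_equal_alt lexema
instance (lexema : String) (out : String) : Decidable (Spec_automata_equal lexema out) := by unfold Spec_automata_equal; infer_instance

-- ===== CLAIM (what is proved, stated in full; the proofs are below) =====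
def Claim_equal_automata_equal : Prop := ∀ (lexema : String), Dom_automata_equal lexema → Spec_automata_equal lexema (automata_equal lexema)

-- ===== LEMMAS AND PROOFS =====

-- A's loop from state k consumes l; it ends in k + |l| iff l is a prefix of
-- what remains of "equal" after k characters, and in -1 otherwise.
theorem automata_equal_loop_char (l : List Char) : ∀ k : Int, 0 ≤ k → k ≤ 5 →
    automata_equal_loop k l =
      if l <+: ("equal".toList.drop k.toNat) then k + l.length else -1 := by
  have heq : "equal".toList = ['e', 'q', 'u', 'a', 'l'] := rfl
  induction l with
  | nil => intro k _ _; simp [automata_equal_loop]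
  | cons c rest ih =>
    intro k hk0 hk5
    interval_cases k
    · -- k = 0
      simp only [automata_equal_loop, heq]
      by_cases hc : c = 'e'
      · subst hc
        simp [ih 1 (by omega) (by omega), heq, List.cons_prefix_cons]
        split <;> push_cast <;> omega
      · simp [hc, List.cons_prefix_cons]
    · -- k = 1
      simp only [automata_equal_loop, heq]
      by_cases hc : c = 'q'
      · subst hc
        simp [ih 2 (by omega) (by omega), heq, List.cons_prefix_cons]
        split <;> push_cast <;> omega
      · simp [hc, List.cons_prefix_cons]
    · -- k = 2
      simp only [automata_equal_loop, heq]
      by_cases hc : c = 'u'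
      · subst hc
        simp [ih 3 (by omega) (by omega), heq, List.cons_prefix_cons]
        split <;> push_cast <;> omega
      · simp [hc, List.cons_prefix_cons]
    · -- k = 3
      simp only [automata_equal_loop, heq]
      by_cases hc : c = 'a'
      · subst hc
        simp [ih 4 (by omega) (by omega), heq, List.cons_prefix_cons]
        split <;> push_cast <;> omega
      · simp [hc, List.cons_prefix_cons]
    · -- k = 4
      simp only [automata_equal_loop, heq]
      by_cases hc : c = 'l'
      · subst hc
        simp [ih 5 (by omega) (by omega), heq, List.cons_prefix_cons]
        split <;> push_cast <;> omega
      · simp [hc, List.cons_prefix_cons]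
    · -- k = 5: no transition from the final state
      simp [automata_equal_loop, heq]

-- ===== VERDICT (by name: the statement is the Claim_ definition above) =====
theorem automata_equal_spec : Claim_equal_automata_equal := by
  intro lexema _
  unfold Spec_automata_equal automata_equal automata_equal_alt
  have h := automata_equal_loop_char lexema.toList 0 (by norm_num) (by norm_num)
  simp only [Int.toNat_zero, List.drop_zero, zero_add] at h
  rw [h]
  by_cases heq : lexema.toList = "equal".toList
  · simp [heq]
  · by_cases hp : lexema.toList <+: "equal".toList
    · -- proper prefix of "equal"
      have htake : lexema.toList = "equal".toList.take lexema.toList.length :=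
        List.prefix_iff_eq_take.mp hp
      have hlt : lexema.toList.length < 5 := by
        have hle : lexema.toList.length ≤ 5 := by simpa using hp.length_le
        rcases lt_or_eq_of_le hle with h' | h'
        · exact h'
        · exact absurd (by rw [htake, h']; simp) heq
      rw [if_pos hp, if_neg (show (lexema.toList.length : Int) ≠ -1 by omega)]
      have hmem : (lexema.toList.length : Int) ∉ ([5] : List Int) := by
        simp only [List.mem_singleton]
        omega
      rw [if_neg hmem, if_neg heq,
        if_pos ⟨by simpa [String.length_toList] using hlt,
                by simpa [String.length_toList] using htake⟩]
    · have hnp : ¬ (lexema.toList.length < ("equal".toList).length ∧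
          lexema.toList = "equal".toList.take lexema.toList.length) := by
        rintro ⟨-, h2⟩
        exact hp (List.prefix_iff_eq_take.mpr h2)
      rw [if_neg hp, if_neg heq, if_neg hnp]
      norm_num
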